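-- pv_equiv track=rewrite | github.com/toppic-suite/toppic-suite | mzidGenerator/write_mzIdent.py | trim_seq
-- ===== SOURCE A (Python) =====
-- def trim_seq(seq):#remove (), " " and dots from a sequence
--     seq = seq.replace('(', '')
--     seq = seq.replace(')', '')
--     seq = seq.replace('"', '')
--
--     new_seq = ''
--
--     #remove dots from the beginning or end
--     for i in range(0, len(seq)):
--         if seq[i] == "." and i > 0:
--             try:
--                 int(seq[i -1])
--                 new_seq = new_seq + seq[i]
--             except ValueError:
--                 continue
--         else:
--             if seq[i] != ".":
--                 new_seq = new_seq + seq[i]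
--     return new_seq
-- ===== SOURCE B (Python) =====
-- def trim_seq(seq):
--     cleaned = ''.join(c for c in seq if c not in '()"')
--     parts = cleaned.split('.')
--     out = parts[0]
--     for prev, part in zip(parts, parts[1:]):
--         if prev and prev[-1] in '0123456789':
--             out += '.'
--         out += part
--     return out
-- ===== Notes on version B (the rewrite author's own statement) =====
-- stated objective: alternative
-- what changed: Instead of A's three replace() passes followed by an index loop that decides each dot with a try/except int() probe on the previous character, B filters the unwanted characters once, splits the cleaned string at dots, and re-joins the parts, re-inserting a dot between two parts only when the left part ends in a decimal digit.
import Mathlib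
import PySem

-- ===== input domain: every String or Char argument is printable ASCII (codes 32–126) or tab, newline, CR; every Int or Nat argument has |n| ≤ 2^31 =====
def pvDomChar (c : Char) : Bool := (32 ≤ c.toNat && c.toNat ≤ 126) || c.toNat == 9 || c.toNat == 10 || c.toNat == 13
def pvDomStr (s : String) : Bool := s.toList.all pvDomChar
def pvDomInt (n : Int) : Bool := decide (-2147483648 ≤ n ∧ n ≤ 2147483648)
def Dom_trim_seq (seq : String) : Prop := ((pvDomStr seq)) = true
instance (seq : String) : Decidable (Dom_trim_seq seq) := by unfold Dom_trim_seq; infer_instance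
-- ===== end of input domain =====

-- B replaces A's three replace() passes and index loop with try/except int() by a
-- split-on-'.'-and-rejoin pass (alternative decomposition; same O(n) cost).

-- ===== PORT A =====
-- one iteration of A's "for i in range(0, len(seq))" loop body (acc = new_seq)
def trimStepA (cs : List Char) (acc : List Char) (i : Int) : List Char :=
  if PySem.List.pyGetD cs i ' ' = '.' ∧ i > 0 then
    -- try: int(seq[i-1]); new_seq = new_seq + seq[i]  / except ValueError: continue
    match PySem.Int.ofChars? [PySem.List.pyGetD cs (i - 1) ' '] with
    | some _ => acc ++ [PySem.List.pyGetD cs i ' ']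
    | none => acc
  else if PySem.List.pyGetD cs i ' ' ≠ '.' then acc ++ [PySem.List.pyGetD cs i ' '] else acc

def trim_seq (seq : String) : String :=
  let s1 := PySem.Chars.replace seq.toList ['('] []
  let s2 := PySem.Chars.replace s1 [')'] []
  let s3 := PySem.Chars.replace s2 ['"'] []
  String.mk ((PySem.List.pyRange 0 s3.length 1).foldl (trimStepA s3) [])

-- ===== PORT B =====
-- "prev and prev[-1] in '0123456789'"
def lastDigit (p : List Char) : Bool :=
  match p.getLast? with
  | some c => ['0','1','2','3','4','5','6','7','8','9'].contains c
  | none => false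

-- cleaned.split('.') is ported as List.splitOn '.' (same single-character-separator split)
def trim_seq_alt (seq : String) : String :=
  let cleaned := seq.toList.filter (fun c => !(['(', ')', '"'].contains c))
  let parts := List.splitOn '.' cleaned
  String.mk ((parts.zip parts.tail).foldl
    (fun acc pq => acc ++ (if lastDigit pq.1 then ['.'] else []) ++ pq.2)
    (parts.headD []))

-- ===== PRECONDITION & SPEC =====
def Spec_trim_seq (seq : String) (out : String) : Prop := out = trim_seq_alt seq
instance (seq : String) (out : String) : Decidable (Spec_trim_seq seq out) := by unfold Spec_trim_seq; infer_instance

-- ===== CLAIM (what is proved, stated in full; the proofs are below) =====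
def Claim_equal_trim_seq : Prop := ∀ (seq : String), Dom_trim_seq seq → Spec_trim_seq seq (trim_seq seq)

-- ===== LEMMAS AND PROOFS =====

-- digit-ness of an optional previous character
def pvIsDigitOpt (p : Option Char) : Bool :=
  match p with
  | some q => ['0','1','2','3','4','5','6','7','8','9'].contains q
  | none => false

-- common form: scan with the previous character of the cleaned string
def goTrim (p : Option Char) : List Char → List Char
  | [] => []
  | c :: rest => (if c ≠ '.' ∨ pvIsDigitOpt p = true then [c] else []) ++ goTrim (some c) rest

theorem lastDigit_eq (p : List Char) : lastDigit p = pvIsDigitOpt p.getLast? := by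
  unfold lastDigit pvIsDigitOpt; cases p.getLast? <;> rfl

theorem goTrim_congr (p q : Option Char) (h : pvIsDigitOpt p = pvIsDigitOpt q) :
    ∀ xs, goTrim p xs = goTrim q xs := by
  intro xs; cases xs with
  | nil => rfl
  | cons c rest => simp [goTrim, h]

-- single-char str.replace with '' is a filter
theorem replace_go_single (c : Char) :
    ∀ (fuel : Nat) (l acc : List Char), l.length ≤ fuel →
      PySem.Chars.replace.go [c] [] fuel l acc = acc.reverse ++ l.filter (fun x => x ≠ c) := by
  intro fuel
  induction fuel with
  | zero => intro l acc h; cases l with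
    | nil => simp [PySem.Chars.replace.go]
    | cons a t => simp at h
  | succ n ih =>
    intro l acc h
    cases l with
    | nil => simp [PySem.Chars.replace.go]
    | cons a t =>
      simp only [PySem.Chars.replace.go]
      by_cases hac : a = c
      · subst hac
        have hp : List.isPrefixOf [a] (a :: t) = true := by simp [List.isPrefixOf]
        rw [hp]
        simp [ih t acc (by simpa using Nat.le_of_succ_le_succ h), List.filter_cons]
      · have hp : List.isPrefixOf [c] (a :: t) = false := by
          simp [List.isPrefixOf]; exact fun h' => absurd h'.symm hac
        rw [hp]
        simp only [Bool.false_eq_true, if_false]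
        rw [ih t (a :: acc) (by simpa using Nat.le_of_succ_le_succ h)]
        simp [List.filter_cons, hac]

theorem replace_single (cs : List Char) (c : Char) :
    PySem.Chars.replace cs [c] [] = cs.filter (fun x => x ≠ c) := by
  unfold PySem.Chars.replace
  rw [if_neg (by simp)]
  exact (replace_go_single c cs.length cs [] le_rfl).trans (by simp)

-- the digit probe int(prev) succeeds exactly on '0'..'9', for domain characters
theorem ofChars_digit (q : Char) (hq : pvDomChar q = true) :
    (PySem.Int.ofChars? [q]).isSome = pvIsDigitOpt (some q) := by
  have hrep : q = Char.ofNat q.toNat := (Char.ofNat_toNat q).symm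
  have hn : q.toNat = 9 ∨ q.toNat = 10 ∨ q.toNat = 13 ∨ (32 ≤ q.toNat ∧ q.toNat ≤ 126) := by
    simp [pvDomChar] at hq; omega
  rw [hrep]
  rcases hn with h | h | h | ⟨h1, h2⟩
  · rw [h]; decide
  · rw [h]; decide
  · rw [h]; decide
  · interval_cases (q.toNat) <;> decide

def lastPrev (p : Option Char) (xs : List Char) : Option Char := xs.getLast?.or p

theorem goTrim_snoc : ∀ (xs : List Char) (p : Option Char) (c : Char),
    goTrim p (xs ++ [c]) =
      goTrim p xs ++ (if c ≠ '.' ∨ pvIsDigitOpt (lastPrev p xs) = true then [c] else []) := by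
  intro xs
  induction xs with
  | nil => intro p c; simp [goTrim, lastPrev]
  | cons a t ih =>
    intro p c
    have hlp : lastPrev p (a :: t) = lastPrev (some a) t := by
      simp only [lastPrev, List.getLast?_cons]
      cases t.getLast? <;> simp
    simp only [List.cons_append, goTrim]
    rw [ih (some a), hlp, List.append_assoc]

-- A's index loop is goTrim, when every character is in the domain
theorem foldl_trimStepA (cs : List Char) (hdom : ∀ c ∈ cs, pvDomChar c = true) :
    (PySem.List.pyRange 0 cs.length 1).foldl (trimStepA cs) [] = goTrim none cs := by
  induction cs using List.reverseRecOn with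
  | nil => simp [PySem.List.pyRange, goTrim]
  | append_singleton xs c ih =>
    have hxs : ∀ x ∈ xs, pvDomChar x = true := fun x hx => hdom x (by simp [hx])
    have hc : pvDomChar c = true := hdom c (by simp)
    have hlen : ((xs ++ [c]).length : Int) = (xs.length : Int) + 1 := by simp
    rw [hlen, PySem.List.pyRange_one_succ_right (by positivity), List.foldl_append]
    have hcong : (PySem.List.pyRange 0 xs.length 1).foldl (trimStepA (xs ++ [c])) []
        = (PySem.List.pyRange 0 xs.length 1).foldl (trimStepA xs) [] := by
      apply PySem.List.foldl_congr_mem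
      intro acc i hi
      have hi' := (PySem.List.mem_pyRange_one).mp hi
      have hget : ∀ j : Int, 0 ≤ j → j < xs.length →
          PySem.List.pyGetD (xs ++ [c]) j ' ' = PySem.List.pyGetD xs j ' ' := by
        intro j hj0 hjl
        rw [PySem.List.pyGetD_eq_getElem (xs ++ [c]) ' ' hj0 (by simp; omega),
            PySem.List.pyGetD_eq_getElem xs ' ' hj0 (by omega)]
        exact List.getElem_append_left (by omega)
      unfold trimStepA
      rw [hget i hi'.1 hi'.2]
      by_cases h1 : PySem.List.pyGetD xs i ' ' = '.' ∧ i > 0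
      · rw [if_pos h1, if_pos h1, hget (i - 1) (by omega) (by omega)]
      · rw [if_neg h1, if_neg h1]
    rw [hcong, ih hxs, goTrim_snoc]
    -- the final step at index xs.length
    simp only [List.foldl_cons, List.foldl_nil]
    unfold trimStepA
    have hgetc : PySem.List.pyGetD (xs ++ [c]) (xs.length : Int) ' ' = c := by
      rw [PySem.List.pyGetD_eq_getElem (xs ++ [c]) ' ' (by positivity) (by simp)]
      simp
    rw [hgetc]
    by_cases hcdot : c = '.'
    · subst hcdot
      cases xs with
      | nil =>
        simp only [List.length_nil, Nat.cast_zero, gt_iff_lt, lt_irrefl, and_false, if_neg,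
          not_false_eq_true, lastPrev]
        simp [goTrim, pvIsDigitOpt]
      | cons a t =>
        have hpos : ((a :: t).length : Int) > 0 := by simp
        rw [if_pos ⟨rfl, hpos⟩]
        have hlast : (a :: t).getLast? = some ((a :: t).getLast (by simp)) :=
          List.getLast?_eq_getLast (by simp)
        have hprev : PySem.List.pyGetD (a :: t ++ ['.']) ((((a :: t).length : Nat) : Int) - 1) ' '
            = (a :: t).getLast (by simp) := by
          rw [PySem.List.pyGetD_eq_getElem (a :: t ++ ['.']) ' ' (by simp) (by simp)]
          rw [List.getElem_append_left (by simp)]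
          rw [List.getLast_eq_getElem]
          congr 1
          simp
        rw [hprev]
        have hql : pvDomChar ((a :: t).getLast (by simp)) = true :=
          hxs _ (List.getLast_mem _)
        have := ofChars_digit ((a :: t).getLast (by simp)) hql
        simp only [lastPrev, hlast, Option.or_some]
        by_cases hd : pvIsDigitOpt (some ((a :: t).getLast (by simp))) = true
        · have hsome : (PySem.Int.ofChars? [(a :: t).getLast (by simp)]).isSome = true := by
            rw [this]; exact hd
          obtain ⟨v, hv⟩ := Option.isSome_iff_exists.mp hsome
          rw [hv]
          simp [hd]
        · have hnone : PySem.Int.ofChars? [(a :: t).getLast (by simp)] = none := by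
            have h2 : (PySem.Int.ofChars? [(a :: t).getLast (by simp)]).isSome = false := by
              rw [this]; simpa using hd
            exact Option.not_isSome_iff_eq_none.mp (by simp [h2])
          rw [hnone]
          simp [hd]
    · rw [if_neg (by simp [hcdot])]
      simp [hcdot]

-- the three single-char replaces equal B's one filter
theorem replace3_eq_filter (cs : List Char) :
    PySem.Chars.replace (PySem.Chars.replace (PySem.Chars.replace cs ['('] []) [')'] []) ['"'] []
    = cs.filter (fun c => !(['(', ')', '"'].contains c)) := by
  rw [replace_single, replace_single, replace_single, List.filter_filter, List.filter_filter]
  apply List.filter_congr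
  intro c _
  by_cases h1 : c = '(' <;> by_cases h2 : c = ')' <;> by_cases h3 : c = '"' <;>
    simp_all

-- B's rejoin, written recursively over the parts
def glueTail (p : List Char) : List (List Char) → List Char
  | [] => []
  | q :: rest => (if lastDigit p then ['.'] else []) ++ q ++ glueTail q rest

theorem foldl_zip_eq_glueTail : ∀ (rest : List (List Char)) (p : List Char) (acc : List Char),
    (((p :: rest).zip rest).foldl
      (fun acc pq => acc ++ (if lastDigit pq.1 then ['.'] else []) ++ pq.2) acc)
    = acc ++ glueTail p rest := by
  intro rest
  induction rest with
  | nil => intro p acc; simp [glueTail]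
  | cons q r ih =>
    intro p acc
    simp only [List.zip_cons_cons, List.foldl_cons, glueTail]
    rw [ih q]
    simp [List.append_assoc]

-- the split-and-rejoin of t, with a prefix pre glued onto its first part
theorem splitOn_glue : ∀ (t pre : List Char),
    (((List.splitOnP (fun c => c == '.') t).modifyHead (fun x => pre ++ x)).headD [])
      ++ glueTail (((List.splitOnP (fun c => c == '.') t).modifyHead (fun x => pre ++ x)).headD [])
          (((List.splitOnP (fun c => c == '.') t).modifyHead (fun x => pre ++ x)).tail)
    = pre ++ goTrim pre.getLast? t := by
  intro t
  induction t with
  | nil =>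
    intro pre
    simp [List.splitOnP_nil, glueTail, goTrim]
  | cons c r ih =>
    intro pre
    by_cases hc : c = '.'
    · subst hc
      rw [List.splitOnP_cons]
      simp only [beq_self_eq_true, if_pos]
      obtain ⟨h, tl, hht⟩ : ∃ h tl, List.splitOnP (fun c => c == '.') r = h :: tl := by
        cases hsp : List.splitOnP (fun c => c == '.') r with
        | nil => exact absurd hsp (List.splitOnP_ne_nil _ r)
        | cons h tl => exact ⟨h, tl, rfl⟩
      have hid : (List.splitOnP (fun c => c == '.') r).modifyHead (fun x => [] ++ x)
          = h :: tl := by rw [hht]; rfl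
      have hih := ih ([] : List Char)
      rw [hid] at hih
      simp only [List.nil_append, List.getLast?_nil] at hih
      simp only [hht, List.modifyHead, List.headD, List.tail, glueTail]
      rw [lastDigit_eq]
      have hgo : goTrim (some '.') r = goTrim (none : Option Char) r :=
        goTrim_congr _ _ (by rfl) r
      simp only [goTrim]
      rw [hgo]
      simp only [List.headD, List.tail] at hih
      by_cases hd : pvIsDigitOpt pre.getLast? = true
      · simp [hd, hih, List.append_assoc]
      · simp only [hd, Bool.false_eq_true, if_false, ne_eq, not_true_eq_false, false_or]
        simp only [eq_iff_iff, iff_false] at hd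
        simp [hd, hih]
    · rw [List.splitOnP_cons]
      have hbe : (c == '.') = false := by simp [hc]
      rw [hbe]
      simp only [Bool.false_eq_true, if_false]
      have hmm : ((List.splitOnP (fun c => c == '.') r).modifyHead (List.cons c)).modifyHead
          (fun x => pre ++ x)
          = (List.splitOnP (fun c => c == '.') r).modifyHead (fun x => (pre ++ [c]) ++ x) := by
        cases List.splitOnP (fun c => c == '.') r with
        | nil => rfl
        | cons h tl => simp [List.modifyHead]
      rw [hmm, ih (pre ++ [c])]
      simp only [goTrim, List.getLast?_concat]
      simp [hc, List.append_assoc]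

-- ===== VERDICT (by name: the statement is the Claim_ definition above) =====
theorem trim_seq_spec : Claim_equal_trim_seq := by
  intro seq hdom
  unfold Spec_trim_seq trim_seq trim_seq_alt
  simp only
  rw [replace3_eq_filter]
  set kept := seq.toList.filter (fun c => !(['(', ')', '"'].contains c)) with hkept
  have hdom' : ∀ c ∈ kept, pvDomChar c = true := by
    intro c hc
    have : c ∈ seq.toList := List.mem_of_mem_filter hc
    exact (List.all_eq_true.mp hdom) c this
  rw [foldl_trimStepA _ hdom']
  have hsplit : List.splitOn '.' kept = List.splitOnP (fun c => c == '.') kept := rfl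
  cases hsp : List.splitOn '.' kept with
  | nil => exact absurd (hsplit ▸ hsp) (List.splitOnP_ne_nil _ kept)
  | cons h tl =>
    have hid : (List.splitOnP (fun c => c == '.') kept).modifyHead (fun x => [] ++ x)
        = h :: tl := by rw [← hsplit, hsp]; rfl
    have := splitOn_glue kept []
    rw [hid] at this
    simp only [List.nil_append, List.getLast?_nil, List.headD, List.tail] at this
    simp only [List.tail_cons, List.headD_cons]
    rw [foldl_zip_eq_glueTail, this]
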